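-- pv_equiv track=rewrite | github.com/huakehe/Gomoku | gobang.py | evaluate_diag
-- ===== SOURCE A (Python) =====
-- def Scoring(my_turn, connected_stone, openings):
--
--     # my turn
--     if(my_turn and connected_stone==4 and openings==2): #(4 2)
--         return 20000000
--     if(my_turn and connected_stone==4 and openings==1): #(4 1)
--         return 20000000
--     if(my_turn and connected_stone==3 and openings==2): #(3 2)
--         return 2500
--     if(my_turn and connected_stone==3 and openings==1): #(3 1)
--         return 15
--     if(my_turn and connected_stone==2 and openings==2): #(2 2)
--         return 12
--     if(my_turn and connected_stone==2 and openings==1): #(2 1)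
--         return 6
--     if(my_turn and connected_stone==1 and openings==2): #(1 2)
--         return 2
--     if(my_turn and connected_stone==1 and openings==1): #(1 1)
--         return 1
--
--
--     # not my turn
--     if(not(my_turn) and connected_stone==4 and openings==2): #(4 2)
--         return 100000
--     if(not(my_turn) and connected_stone==4 and openings==1): #(4 1)
--         return 100
--     if(not(my_turn) and connected_stone==3 and openings==2): #(3 2)
--         return 100
--     if(not(my_turn) and connected_stone==3 and openings==1): #(3 1)
--         return 10
--     if(not(my_turn) and connected_stone==2 and openings==2): #(2 2)
--         return 10
--     if(not(my_turn) and connected_stone==2 and openings==1): #(2 1)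
--         return 5
--     if(not(my_turn) and connected_stone==1 and openings==2): #(1 2)
--         return 2
--     if(not(my_turn) and connected_stone==1 and openings==1): #(1 1)
--         return 1
--
--     # no opening, 0 score
--     if(openings==0 and connected_stone<5):
--         return 0
--     # win already
--     else:
--         return 50000000
--
-- def evaluate_diag(my_turn,color,diagonal_list):
--     score = 0
--     for i in range(len(diagonal_list)):
--         open_diag = 0
--         connected_stone = 0
--         for j in range(len(diagonal_list[i])):
--             if(diagonal_list[i][j]==color):
--                 connected_stone = connected_stone + 1
--             else:
--                 if(diagonal_list[i][j] == -1 and connected_stone>0):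
--                     open_diag += 1
--                     score = score + Scoring(my_turn, connected_stone, open_diag)
--                     connected_stone = 0
--                     open_diag = 1
--                 else:
--                     if(diagonal_list[i][j] == -1):
--                         open_diag = 1
--
--                     else:
--                         if(connected_stone > 0):
--                             score = score + Scoring(my_turn, connected_stone, open_diag)
--                             connected_stone = 0
--                             open_diag = 0
--
--                         else:
--                             open_diag = 0
--
--
--         if(connected_stone > 0):
--             score = score + Scoring(my_turn, connected_stone, open_diag)
--
--     return score
-- ===== SOURCE B (Python) =====
-- # Boundary-predicate rewrite: run starts/ends are found by purely local conditions
-- # (comprehensions over indices), paired by zip, and scored by a per-side dict table;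
-- # no carried scan state at all.
--
-- _MINE = {(4, 2): 20000000, (4, 1): 20000000, (3, 2): 2500, (3, 1): 15,
--          (2, 2): 12, (2, 1): 6, (1, 2): 2, (1, 1): 1}
-- _THEIRS = {(4, 2): 100000, (4, 1): 100, (3, 2): 100, (3, 1): 10,
--            (2, 2): 10, (2, 1): 5, (1, 2): 2, (1, 1): 1}
--
-- def _score_run(my_turn, length, openings):
--     table = _MINE if my_turn else _THEIRS
--     if (length, openings) in table:
--         return table[(length, openings)]
--     return 0 if (openings == 0 and length < 5) else 50000000
--
-- def evaluate_diag(my_turn, color, diagonal_list):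
--     total = 0
--     for row in diagonal_list:
--         n = len(row)
--         starts = [i for i in range(n) if row[i] == color and (i == 0 or row[i-1] != color)]
--         ends = [i for i in range(n) if row[i] == color and (i == n - 1 or row[i+1] != color)]
--         for s, e in zip(starts, ends):
--             openings = (1 if s > 0 and row[s-1] == -1 else 0) + \
--                        (1 if e < n - 1 and row[e+1] == -1 else 0)
--             total += _score_run(my_turn, e - s + 1, openings)
--     return total
-- ===== Notes on version B (the rewrite author's own statement) =====
-- stated objective: alternative
-- what changed: Replaces A's per-cell state machine (open_diag/connected_stone carried through the scan) and 18-branch Scoring cascade by a declarative formulation: run starts and ends are identified by purely local boundary predicates in two index comprehensions, paired positionally by zip, and each run is scored from its two adjacent cells via a per-side dict table.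
import Mathlib
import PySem

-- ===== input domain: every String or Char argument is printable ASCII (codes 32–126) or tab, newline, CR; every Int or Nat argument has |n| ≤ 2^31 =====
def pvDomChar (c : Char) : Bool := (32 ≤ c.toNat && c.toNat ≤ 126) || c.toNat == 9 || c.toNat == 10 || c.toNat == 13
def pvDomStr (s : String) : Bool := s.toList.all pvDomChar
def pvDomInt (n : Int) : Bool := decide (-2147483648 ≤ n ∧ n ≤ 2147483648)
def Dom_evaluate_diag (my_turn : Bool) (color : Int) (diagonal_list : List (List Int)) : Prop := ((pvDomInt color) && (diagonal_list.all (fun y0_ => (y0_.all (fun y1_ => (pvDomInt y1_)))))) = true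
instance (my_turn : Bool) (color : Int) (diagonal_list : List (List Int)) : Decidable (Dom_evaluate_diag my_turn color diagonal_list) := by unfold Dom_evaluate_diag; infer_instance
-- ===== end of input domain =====

-- B drops A's carried scan state (open_diag/connected_stone): run starts and ends are found by
-- purely local boundary predicates, paired by zip, and scored via a per-side table
-- (objective: alternative decomposition, same cost).

-- ===== PORT A =====
def pyScoring (my_turn : Bool) (connected_stone openings : Int) : Int :=
  if my_turn ∧ connected_stone = 4 ∧ openings = 2 then 20000000
  else if my_turn ∧ connected_stone = 4 ∧ openings = 1 then 20000000
  else if my_turn ∧ connected_stone = 3 ∧ openings = 2 then 2500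
  else if my_turn ∧ connected_stone = 3 ∧ openings = 1 then 15
  else if my_turn ∧ connected_stone = 2 ∧ openings = 2 then 12
  else if my_turn ∧ connected_stone = 2 ∧ openings = 1 then 6
  else if my_turn ∧ connected_stone = 1 ∧ openings = 2 then 2
  else if my_turn ∧ connected_stone = 1 ∧ openings = 1 then 1
  else if ¬my_turn ∧ connected_stone = 4 ∧ openings = 2 then 100000
  else if ¬my_turn ∧ connected_stone = 4 ∧ openings = 1 then 100
  else if ¬my_turn ∧ connected_stone = 3 ∧ openings = 2 then 100
  else if ¬my_turn ∧ connected_stone = 3 ∧ openings = 1 then 10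
  else if ¬my_turn ∧ connected_stone = 2 ∧ openings = 2 then 10
  else if ¬my_turn ∧ connected_stone = 2 ∧ openings = 1 then 5
  else if ¬my_turn ∧ connected_stone = 1 ∧ openings = 2 then 2
  else if ¬my_turn ∧ connected_stone = 1 ∧ openings = 1 then 1
  else if openings = 0 ∧ connected_stone < 5 then 0
  else 50000000

def stepA (my_turn : Bool) (color : Int) (st : Int × Int × Int) (cell : Int) : Int × Int × Int :=
  let score := st.1
  let open_diag := st.2.1
  let connected := st.2.2
  if cell = color then (score, open_diag, connected + 1)
  else if cell = -1 ∧ 0 < connected then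
    (score + pyScoring my_turn connected (open_diag + 1), 1, 0)
  else if cell = -1 then (score, 1, connected)
  else if 0 < connected then (score + pyScoring my_turn connected open_diag, 0, 0)
  else (score, 0, connected)

def evaluate_diag (my_turn : Bool) (color : Int) (diagonal_list : List (List Int)) : Int :=
  diagonal_list.foldl (fun score row =>
    let st := row.foldl (stepA my_turn color) (score, 0, 0)
    st.1 + (if 0 < st.2.2 then pyScoring my_turn st.2.2 st.2.1 else 0)) 0

-- ===== PORT B =====
def pvMine : PySem.Dict (Int × Int) Int :=
  PySem.Dict.mk [((4, 2), 20000000), ((4, 1), 20000000), ((3, 2), 2500), ((3, 1), 15),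
                 ((2, 2), 12), ((2, 1), 6), ((1, 2), 2), ((1, 1), 1)]

def pvTheirs : PySem.Dict (Int × Int) Int :=
  PySem.Dict.mk [((4, 2), 100000), ((4, 1), 100), ((3, 2), 100), ((3, 1), 10),
                 ((2, 2), 10), ((2, 1), 5), ((1, 2), 2), ((1, 1), 1)]

def runScore (my_turn : Bool) (length openings : Int) : Int :=
  let table := if my_turn then pvMine else pvTheirs
  match PySem.Dict.get? table (length, openings) with
  | some v => v
  | none => if openings = 0 ∧ length < 5 then 0 else 50000000

-- row.getD i 0 transliterates row[i]: every index below is a Nat already guarded in range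
-- (the default is never reached on the guard's true branch), so it is exact.
def evaluate_diag_alt (my_turn : Bool) (color : Int) (diagonal_list : List (List Int)) : Int :=
  diagonal_list.foldl (fun total row =>
    let n := row.length
    let starts := (List.range n).filter
      (fun i => decide (row.getD i 0 = color ∧ (i = 0 ∨ row.getD (i - 1) 0 ≠ color)))
    let ends := (List.range n).filter
      (fun i => decide (row.getD i 0 = color ∧ (i = n - 1 ∨ row.getD (i + 1) 0 ≠ color)))
    (starts.zip ends).foldl (fun acc se =>
      acc + runScore my_turn ((se.2 : Int) - (se.1 : Int) + 1)
        ((if 0 < se.1 ∧ row.getD (se.1 - 1) 0 = -1 then 1 else 0) +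
         (if se.2 < n - 1 ∧ row.getD (se.2 + 1) 0 = -1 then 1 else 0))) total) 0

-- ===== PRECONDITION & SPEC =====
def Spec_evaluate_diag (my_turn : Bool) (color : Int) (diagonal_list : List (List Int)) (out : Int) : Prop := out = evaluate_diag_alt my_turn color diagonal_list
instance (my_turn : Bool) (color : Int) (diagonal_list : List (List Int)) (out : Int) : Decidable (Spec_evaluate_diag my_turn color diagonal_list out) := by unfold Spec_evaluate_diag; infer_instance

-- ===== CLAIM (what is proved, stated in full; the proofs are below) =====
def Claim_equal_evaluate_diag : Prop := ∀ (my_turn : Bool) (color : Int) (diagonal_list : List (List Int)), Dom_evaluate_diag my_turn color diagonal_list → Spec_evaluate_diag my_turn color diagonal_list (evaluate_diag my_turn color diagonal_list)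

-- ===== LEMMAS AND PROOFS =====

-- A's 18-branch cascade equals B's table lookup on the reachable arguments
lemma score_eq (my : Bool) (c o : Int) (hc : 1 ≤ c) (ho0 : 0 ≤ o) (ho2 : o ≤ 2) :
    pyScoring my c o = runScore my c o := by
  by_cases h1 : c = 1
  · subst h1; interval_cases o <;> cases my <;> decide
  · by_cases h2 : c = 2
    · subst h2; interval_cases o <;> cases my <;> decide
    · by_cases h3 : c = 3
      · subst h3; interval_cases o <;> cases my <;> decide
      · by_cases h4 : c = 4
        · subst h4; interval_cases o <;> cases my <;> decide
        · have n1 : ¬(1:Int) = c := fun h => h1 h.symm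
          have n2 : ¬(2:Int) = c := fun h => h2 h.symm
          have n3 : ¬(3:Int) = c := fun h => h3 h.symm
          have n4 : ¬(4:Int) = c := fun h => h4 h.symm
          cases my <;>
            simp [pyScoring, runScore, pvMine, pvTheirs, PySem.Dict.get?,
                  PySem.Dict.get?_mk_cons, Prod.mk.injEq, n1, n2, n3, n4, h1, h2, h3, h4]

-- the value A's inner loop adds to the score, as a structural function of the row
def pvF (my : Bool) (color : Int) : Int → Int → List Int → Int
  | c, od, [] => if 0 < c then pyScoring my c od else 0
  | c, od, x :: xs =>
    if x = color then pvF my color (c + 1) od xs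
    else if x = -1 then (if 0 < c then pyScoring my c (od + 1) else 0) + pvF my color 0 1 xs
    else (if 0 < c then pyScoring my c od else 0) + pvF my color 0 0 xs

def pvFinish (my : Bool) (st : Int × Int × Int) : Int :=
  st.1 + (if 0 < st.2.2 then pyScoring my st.2.2 st.2.1 else 0)

lemma innerA_eq_pvF (my : Bool) (color : Int) (l : List Int) :
    ∀ (s c od : Int), 0 ≤ c →
      pvFinish my (l.foldl (stepA my color) (s, od, c)) = s + pvF my color c od l := by
  induction l with
  | nil => intro s c od _; simp [pvFinish, pvF]
  | cons x xs ih =>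
    intro s c od hc
    by_cases hx : x = color
    · rw [List.foldl_cons, show stepA my color (s, od, c) x = (s, od, c + 1) from by
        simp [stepA, hx], ih s (c + 1) od (by omega)]
      simp [pvF, hx]
    · by_cases he : x = -1
      · have hxc : ¬(-1 : Int) = color := by rw [← he]; exact hx
        by_cases hcp : 0 < c
        · rw [List.foldl_cons, show stepA my color (s, od, c) x
              = (s + pyScoring my c (od + 1), 1, 0) from by
            simp [stepA, he, hxc, hcp], ih _ 0 1 le_rfl]
          simp [pvF, he, hxc, hcp]; ring
        · have hc0 : c = 0 := by omega
          subst hc0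
          rw [List.foldl_cons, show stepA my color (s, od, 0) x = (s, 1, 0) from by
            simp [stepA, he, hxc, hcp], ih s 0 1 le_rfl]
          simp [pvF, he, hxc]
      · by_cases hcp : 0 < c
        · rw [List.foldl_cons, show stepA my color (s, od, c) x
              = (s + pyScoring my c od, 0, 0) from by
            simp [stepA, hx, he, hcp], ih _ 0 0 le_rfl]
          simp [pvF, hx, he, hcp]; ring
        · have hc0 : c = 0 := by omega
          subst hc0
          rw [List.foldl_cons, show stepA my color (s, od, 0) x = (s, 0, 0) from by
            simp [stepA, hx, he, hcp], ih s 0 0 le_rfl]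
          simp [pvF, hx, he]

-- intermediate segment view of one row: score each maximal run with its two open ends
def rowScoreB (my : Bool) (color : Int) : Bool → List Int → Int
  | _, [] => 0
  | prev_empty, x :: xs =>
    if x = color then
      let run : Int := 1 + ((xs.takeWhile (fun c => c = color)).length : Int)
      let rest := xs.dropWhile (fun c => c = color)
      let after : Bool := decide (rest.head? = some (-1))
      runScore my run ((if prev_empty then 1 else 0) + (if after then 1 else 0))
        + rowScoreB my color false rest
    else rowScoreB my color (decide (x = -1)) xs
  termination_by _ l => l.length
  decreasing_by
    · exact Nat.lt_succ_of_le (List.length_dropWhile_le _ _)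
    · simp

-- pvF equals the segment view (proved jointly with the in-run generalisation)
lemma pvF_eq_rowScoreB (my : Bool) (color : Int) (l : List Int) :
    (∀ prev : Bool, pvF my color 0 (if prev then 1 else 0) l = rowScoreB my color prev l) ∧
    (∀ (prev : Bool) (k : Int), 1 ≤ k →
      pvF my color k (if prev then 1 else 0) l =
        runScore my (k + ((l.takeWhile (fun c => c = color)).length : Int))
          ((if prev then 1 else 0) +
           (if (l.dropWhile (fun c => c = color)).head? = some (-1) then 1 else 0))
        + rowScoreB my color false (l.dropWhile (fun c => c = color))) := by
  induction l with
  | nil =>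
    refine ⟨fun prev => by simp [pvF, rowScoreB], fun prev k hk => ?_⟩
    have hs := score_eq my k (if prev then 1 else 0) hk (by split <;> norm_num)
      (by split <;> norm_num)
    simp [pvF, rowScoreB, show (0:Int) < k from by omega, List.takeWhile, List.dropWhile, hs]
  | cons x xs ih =>
    obtain ⟨ih1, ih2⟩ := ih
    constructor
    · intro prev
      by_cases hx : x = color
      · subst hx
        rw [rowScoreB]
        have h2 := ih2 prev 1 le_rfl
        simp only [pvF, if_pos rfl, zero_add] at h2 ⊢
        rw [h2]
        simp
      · by_cases he : x = -1
        · have hxc : ¬(-1 : Int) = color := by rw [← he]; exact hx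
          have h1 := ih1 true
          rw [rowScoreB]
          norm_num at h1
          simp [pvF, hx, he, hxc, h1]
        · have h1 := ih1 false
          rw [rowScoreB]
          norm_num at h1
          simp [pvF, hx, he, h1]
    · intro prev k hk
      by_cases hx : x = color
      · subst hx
        have h2 := ih2 prev (k + 1) (by omega)
        simp only [pvF, if_pos rfl] at h2 ⊢
        rw [h2, List.takeWhile_cons, List.dropWhile_cons]
        simp only [decide_true, if_pos rfl, decide_eq_true_eq, if_true, List.length_cons]
        congr 2
        push_cast
        ring
      · have hs := score_eq my k ((if prev then 1 else 0) + (if decide (x = -1) then 1 else 0)) hk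
          (by split <;> split <;> norm_num) (by split <;> split <;> norm_num)
        have htw : ((x :: xs).takeWhile (fun c => c = color)) = [] := by
          simp [List.takeWhile_cons, hx]
        have hdw : ((x :: xs).dropWhile (fun c => c = color)) = x :: xs := by
          simp [List.dropWhile_cons, hx]
        rw [htw, hdw]
        by_cases he : x = -1
        · have hxc : ¬(-1 : Int) = color := by rw [← he]; exact hx
          have h1 := ih1 true
          norm_num at h1
          rw [he] at hs
          norm_num at hs
          rw [rowScoreB]
          simp [pvF, hx, he, hxc, h1, hs, show (0:Int) < k from by omega]
        · have h1 := ih1 false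
          norm_num at h1
          rw [rowScoreB]
          norm_num [he] at hs
          simp [pvF, hx, he, h1, hs, show (0:Int) < k from by omega]

-- ===== B-side: boundary predicates describe exactly the maximal runs =====

-- run starts of a list whose (virtual) previous cell is `prev` (none = left edge)
def startsG (color : Int) : Option Int → List Int → List Nat
  | _, [] => []
  | prev, x :: xs =>
    (if x = color ∧ prev ≠ some color then [0] else []) ++ (startsG color (some x) xs).map (· + 1)

-- run ends (the next cell — head of the remaining suffix — is not `color`)
def endsG (color : Int) : List Int → List Nat
  | [] => []
  | x :: xs =>
    (if x = color ∧ xs.head? ≠ some color then [0] else []) ++ (endsG color xs).map (· + 1)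

-- the port's starts-filter computes startsG (generalised over the virtual previous cell)
def sPred (color : Int) (prev : Option Int) (xs : List Int) (i : Nat) : Bool :=
  decide (xs.getD i 0 = color) &&
    (match i with
     | 0 => decide (prev ≠ some color)
     | j + 1 => decide (xs.getD j 0 ≠ color))

def ePred (color : Int) (xs : List Int) (i : Nat) : Bool :=
  decide (xs.getD i 0 = color) && decide ((xs.drop (i + 1)).head? ≠ some color)

lemma starts_gen (color : Int) : ∀ (xs : List Int) (prev : Option Int),
    (List.range xs.length).filter (sPred color prev xs) = startsG color prev xs := by
  intro xs
  induction xs with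
  | nil => intro prev; rfl
  | cons x xs ih =>
    intro prev
    rw [List.length_cons, List.range_succ_eq_map, List.filter_cons,
        List.filter_map, startsG]
    have hcomp : (sPred color prev (x :: xs)) ∘ Nat.succ = sPred color (some x) xs := by
      funext j
      cases j <;> simp [sPred, Function.comp]
    rw [hcomp, ih (some x)]
    by_cases h : x = color ∧ prev ≠ some color
    · simp [sPred, h.1, h.2]
    · have : sPred color prev (x :: xs) 0 = false := by
        simp only [sPred, List.getD_cons_zero]
        rcases not_and_or.mp h with h' | h' <;> simp [h']
      simp [this, h]

lemma ends_gen (color : Int) : ∀ (xs : List Int),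
    (List.range xs.length).filter (ePred color xs) = endsG color xs := by
  intro xs
  induction xs with
  | nil => rfl
  | cons x xs ih =>
    rw [List.length_cons, List.range_succ_eq_map, List.filter_cons,
        List.filter_map, endsG]
    have hcomp : (ePred color (x :: xs)) ∘ Nat.succ = ePred color xs := by
      funext j
      simp [ePred, Function.comp]
    rw [hcomp, ih]
    by_cases h : x = color ∧ xs.head? ≠ some color
    · simp [ePred, h.1, h.2]
    · have : ePred color (x :: xs) 0 = false := by
        simp only [ePred, List.getD_cons_zero, List.drop_succ_cons, List.drop_zero]
        rcases not_and_or.mp h with h' | h' <;> simp [h']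
      simp [this, h]

-- the zip-fold of the port, generalised over the virtual previous cell v
def foldG (my : Bool) (v : Option Int) (row : List Int) (ps : List (Nat × Nat)) (acc : Int) : Int :=
  ps.foldl (fun a se =>
    a + runScore my ((se.2 : Int) - (se.1 : Int) + 1)
      ((if se.1 = 0 then (if v = some (-1) then (1:Int) else 0)
        else (if row.getD (se.1 - 1) 0 = -1 then 1 else 0)) +
       (if se.2 < row.length - 1 ∧ row.getD (se.2 + 1) 0 = -1 then 1 else 0))) acc

lemma rowScoreB_indep (my : Bool) (color : Int) (xs : List Int) (b b' : Bool)
    (h : ∀ c, xs.head? = some c → c ≠ color) :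
    rowScoreB my color b xs = rowScoreB my color b' xs := by
  cases xs with
  | nil => rw [rowScoreB, rowScoreB]
  | cons x xs => rw [rowScoreB, rowScoreB, if_neg (h x rfl), if_neg (h x rfl)]

lemma dropWhile_head_not {α : Type} (p : α → Bool) :
    ∀ (l : List α) (y : α), (l.dropWhile p).head? = some y → p y = false := by
  intro l
  induction l with
  | nil => intro y h; simp at h
  | cons x xs ih =>
    intro y h
    rw [List.dropWhile_cons] at h
    by_cases hp : p x
    · exact ih y (by simpa [hp] using h)
    · simp only [hp, if_neg, Bool.false_eq_true, if_false, List.head?_cons,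
        Option.some.injEq] at h
      subst h
      simpa using hp

lemma startsG_run (color : Int) : ∀ (t rest : List Int), (∀ c ∈ t, c = color) →
    startsG color (some color) (t ++ rest) = (startsG color (some color) rest).map (· + t.length) := by
  intro t
  induction t with
  | nil => intro rest _; simp
  | cons c t ih =>
    intro rest hall
    have hc : c = color := hall c (by simp)
    rw [List.cons_append, startsG, hc, if_neg (by simp),
        ih rest (fun d hd => hall d (by simp [hd]))]
    simp only [List.nil_append, List.map_map, List.length_cons]
    congr 1

lemma endsG_run (color : Int) : ∀ (t rest : List Int), t ≠ [] → (∀ c ∈ t, c = color) →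
    rest.head? ≠ some color →
    endsG color (t ++ rest) = (t.length - 1) :: (endsG color rest).map (· + t.length) := by
  intro t
  induction t with
  | nil => intro rest h; exact absurd rfl h
  | cons c t ih =>
    intro rest _ hall hrest
    have hc : c = color := hall c (by simp)
    cases t with
    | nil =>
      rw [List.cons_append, List.nil_append, endsG, hc, if_pos ⟨rfl, hrest⟩]
      simp
    | cons c' t' =>
      have hc' : c' = color := hall c' (by simp)
      rw [List.cons_append, endsG]
      have hhead : ((c' :: t') ++ rest).head? = some color := by simp [hc']
      rw [if_neg (fun hcontra => hcontra.2 hhead),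
          ih rest (by simp) (fun d hd => hall d (by simp [hd])) hrest]
      simp only [List.nil_append, List.map_cons, List.map_map, List.length_cons]
      congr 1

lemma all_getD (color : Int) (l : List Int) (i : Nat) (hi : i < l.length)
    (hall : ∀ c ∈ l, c = color) : l.getD i 0 = color := by
  rw [List.getD, List.getElem?_eq_getElem hi]
  exact hall _ (List.getElem_mem hi)

lemma getD_append_right_len (l₁ l₂ : List Int) (i : Nat) :
    (l₁ ++ l₂).getD (l₁.length + i) 0 = l₂.getD i 0 := by
  simp [List.getD, List.getElem?_append_right]

-- shifting all positions by one step past a non-run cell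
lemma foldG_shift (my : Bool) (x : Int) (xs : List Int) (v : Option Int)
    (ps : List (Nat × Nat)) (acc : Int) :
    foldG my v (x :: xs) (ps.map (Prod.map (· + 1) (· + 1))) acc
      = foldG my (some x) xs ps acc := by
  unfold foldG
  rw [List.foldl_map]
  congr 1
  funext a se
  obtain ⟨s, e⟩ := se
  have harith : (((e + 1 : Nat)) : Int) - ((s + 1 : Nat) : Int) + 1 = (e : Int) - s + 1 := by
    push_cast; ring
  have hlen : (e + 1 < (x :: xs).length - 1) ↔ (e < xs.length - 1) := by
    simp only [List.length_cons]; omega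
  cases s with
  | zero =>
    simp only [Prod.map, harith, List.getD_cons_succ, List.getD_cons_zero, hlen,
      Nat.add_eq_zero, Nat.succ_ne_zero, and_false, if_false, Nat.add_sub_cancel,
      if_true, Option.some.injEq]
  | succ j =>
    simp only [Prod.map, harith, List.getD_cons_succ, hlen, Nat.add_eq_zero,
      Nat.succ_ne_zero, and_false, if_false, Nat.add_sub_cancel, Option.some.injEq]

-- shifting all positions past a whole run of color cells
lemma foldG_shift_run (my : Bool) (color : Int) (run rest : List Int)
    (hne : run ≠ []) (hall : ∀ c ∈ run, c = color) (v : Option Int)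
    (ps : List (Nat × Nat)) (acc : Int) :
    foldG my v (run ++ rest) (ps.map (Prod.map (· + run.length) (· + run.length))) acc
      = foldG my (some color) rest ps acc := by
  have hk : 1 ≤ run.length := by
    cases run with
    | nil => exact absurd rfl hne
    | cons a l => simp
  unfold foldG
  rw [List.foldl_map]
  congr 1
  funext a se
  obtain ⟨s, e⟩ := se
  have harith : (((e + run.length : Nat)) : Int) - ((s + run.length : Nat) : Int) + 1
      = (e : Int) - s + 1 := by push_cast; ring
  have hlen : (e + run.length < (run ++ rest).length - 1) ↔ (e < rest.length - 1) := by
    simp only [List.length_append]; omega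
  have hgR : (run ++ rest).getD (e + run.length + 1) 0 = rest.getD (e + 1) 0 := by
    rw [show e + run.length + 1 = run.length + (e + 1) from by omega, getD_append_right_len]
  cases s with
  | zero =>
    have hgL : (run ++ rest).getD (0 + run.length - 1) 0 = color := by
      rw [Nat.zero_add, List.getD_append _ _ _ _ (by omega)]
      exact all_getD color run _ (by omega) hall
    simp only [Prod.map, harith, hlen, hgR, hgL,
      Nat.add_eq_zero, if_false, Option.some.injEq]
    have h0 : ¬(True ∧ run.length = 0) := fun h => by omega
    simp [h0, hne]
  | succ j =>
    have hgL : (run ++ rest).getD (j + 1 + run.length - 1) 0 = rest.getD (j + 1 - 1) 0 := by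
      rw [show j + 1 + run.length - 1 = run.length + j from by omega, getD_append_right_len]
      simp
    simp only [Prod.map, harith, hlen, hgR, hgL, Nat.add_eq_zero,
      Nat.succ_ne_zero, false_and, if_false, Option.some.injEq]

lemma foldG_cons (my : Bool) (v : Option Int) (row : List Int) (p : Nat × Nat)
    (ps : List (Nat × Nat)) (acc : Int) :
    foldG my v row (p :: ps) acc
      = foldG my v row ps (acc + runScore my ((p.2 : Int) - (p.1 : Int) + 1)
          ((if p.1 = 0 then (if v = some (-1) then (1:Int) else 0)
            else (if row.getD (p.1 - 1) 0 = -1 then 1 else 0)) +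
           (if p.2 < row.length - 1 ∧ row.getD (p.2 + 1) 0 = -1 then 1 else 0))) := rfl

-- main lemma: the boundary zip-fold computes the segment score
lemma foldG_main (my : Bool) (color : Int) : ∀ (n : Nat) (xs : List Int), xs.length ≤ n →
    ∀ (v : Option Int) (acc : Int), (xs.head? = some color → v ≠ some color) →
    foldG my v xs ((startsG color v xs).zip (endsG color xs)) acc
      = acc + rowScoreB my color (decide (v = some (-1))) xs := by
  intro n
  induction n with
  | zero =>
    intro xs hlen v acc _
    have : xs = [] := List.eq_nil_of_length_eq_zero (Nat.le_zero.mp hlen)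
    subst this
    simp [startsG, endsG, foldG, rowScoreB]
  | succ n ih =>
    intro xs hlen v acc hv
    cases xs with
    | nil => simp [startsG, endsG, foldG, rowScoreB]
    | cons x xs' =>
      by_cases hx : x = color
      · -- a run starts here
        subst hx
        have hlen' : xs'.length ≤ n := by simpa using hlen
        have hv' : v ≠ some x := hv rfl
        have htr : xs'.takeWhile (fun c => c = x) ++ xs'.dropWhile (fun c => c = x) = xs' :=
          List.takeWhile_append_dropWhile
        set t := xs'.takeWhile (fun c => c = x) with ht
        set rest := xs'.dropWhile (fun c => c = x) with hrt
        have hall_run : ∀ c ∈ x :: t, c = x := by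
          intro c hc
          rcases List.mem_cons.mp hc with h | h
          · exact h
          · simpa using List.mem_takeWhile_imp h
        have hrest_head : ∀ c, rest.head? = some c → c ≠ x := by
          intro c hc
          simpa using dropWhile_head_not _ _ _ hc
        have hrest_ne : rest.head? ≠ some x := fun h => (hrest_head x h) rfl
        have hrow : x :: xs' = (x :: t) ++ rest := by rw [List.cons_append, htr]
        have hs : startsG x v (x :: xs')
            = 0 :: (startsG x (some x) rest).map (· + (x :: t).length) := by
          rw [startsG, if_pos ⟨rfl, hv'⟩, ← htr, startsG_run x t rest
            (fun c hc => by simpa using List.mem_takeWhile_imp hc)]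
          simp only [List.nil_append, List.singleton_append, List.map_map, List.length_cons]
          congr 1
        have he : endsG x (x :: xs')
            = t.length :: (endsG x rest).map (· + (x :: t).length) := by
          rw [hrow, endsG_run x (x :: t) rest (by simp) hall_run hrest_ne]
          simp only [List.length_cons, Nat.add_sub_cancel]
        rw [rowScoreB, if_pos rfl, ← ht, ← hrt,
            hs, he, List.zip_cons_cons, List.zip_map, foldG_cons, hrow,
            foldG_shift_run my x (x :: t) rest (by simp) hall_run,
            ih rest (le_trans (List.length_dropWhile_le _ _) hlen') (some x) _
              (fun h => ((hrest_head x h) rfl).elim),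
            rowScoreB_indep my x rest _ false hrest_head]
        have harg : ((t.length : Nat) : Int) - ((0 : Nat) : Int) + 1 = 1 + (t.length : Int) := by
          push_cast; ring
        have hafter : ∀ r : List Int, (if t.length < ((x :: t) ++ r).length - 1 ∧
              ((x :: t) ++ r).getD (t.length + 1) 0 = -1 then (1:Int) else 0)
            = (if r.head? = some (-1) then (1:Int) else 0) := by
          intro r
          cases r with
          | nil => simp
          | cons y ys =>
            have hg : ((x :: t) ++ (y :: ys)).getD (t.length + 1) 0 = y := by
              rw [show t.length + 1 = (x :: t).length + 0 from by simp, getD_append_right_len]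
              rfl
            have hcond : t.length < ((x :: t) ++ (y :: ys)).length - 1 := by
              simp only [List.length_append, List.length_cons]; omega
            simp [hg, hcond]
        rw [harg, hafter rest]
        simp only [decide_eq_true_eq, if_true]
        rw [show (if v = some (-1) then (1:Int) else 0) + (if rest.head? = some (-1) then (1:Int) else 0)
            = (if rest.head? = some (-1) then (1:Int) else 0) + (if v = some (-1) then (1:Int) else 0) from by ring]
        ring
      · -- not a run cell: shift everything by one
        have hlen' : xs'.length ≤ n := by simpa using hlen
        have hs : startsG color v (x :: xs') = (startsG color (some x) xs').map (· + 1) := by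
          rw [startsG, if_neg (fun h => hx h.1)]
          simp
        have he : endsG color (x :: xs') = (endsG color xs').map (· + 1) := by
          rw [endsG, if_neg (fun h => hx h.1)]
          simp
        rw [hs, he, List.zip_map, foldG_shift,
            ih xs' hlen' (some x) acc (fun _ => by simpa using hx),
            rowScoreB, if_neg hx]
        simp

-- per-row bridge: the port's inner computation equals the segment score
lemma rowB_eq (my : Bool) (color : Int) (row : List Int) (total : Int) :
    (((List.range row.length).filter
        (fun i => decide (row.getD i 0 = color ∧ (i = 0 ∨ row.getD (i - 1) 0 ≠ color)))).zip
      ((List.range row.length).filter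
        (fun i => decide (row.getD i 0 = color ∧ (i = row.length - 1 ∨ row.getD (i + 1) 0 ≠ color))))).foldl
      (fun acc se =>
        acc + runScore my ((se.2 : Int) - (se.1 : Int) + 1)
          ((if 0 < se.1 ∧ row.getD (se.1 - 1) 0 = -1 then 1 else 0) +
           (if se.2 < row.length - 1 ∧ row.getD (se.2 + 1) 0 = -1 then 1 else 0))) total
    = total + rowScoreB my color false row := by
  have hsf : (List.range row.length).filter
      (fun i => decide (row.getD i 0 = color ∧ (i = 0 ∨ row.getD (i - 1) 0 ≠ color)))
      = startsG color none row := by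
    rw [← starts_gen color row none]
    apply List.filter_congr
    intro i _
    cases i with
    | zero => simp [sPred]
    | succ j => simp [sPred]
  have hef : (List.range row.length).filter
      (fun i => decide (row.getD i 0 = color ∧ (i = row.length - 1 ∨ row.getD (i + 1) 0 ≠ color)))
      = endsG color row := by
    rw [← ends_gen color row]
    apply List.filter_congr
    intro i hi
    have hi' : i < row.length := List.mem_range.mp hi
    unfold ePred
    rw [List.head?_drop]
    by_cases he : i = row.length - 1
    · have hsucc : row.length - 1 + 1 = row.length := by omega
      simp [he, hsucc]
    · have hlt : i + 1 < row.length := by omega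
      simp [he, List.getElem?_eq_getElem hlt]
  rw [hsf, hef]
  have hbody : (fun (acc : Int) (se : Nat × Nat) =>
      acc + runScore my ((se.2 : Int) - (se.1 : Int) + 1)
        ((if 0 < se.1 ∧ row.getD (se.1 - 1) 0 = -1 then 1 else 0) +
         (if se.2 < row.length - 1 ∧ row.getD (se.2 + 1) 0 = -1 then 1 else 0)))
      = (fun (acc : Int) (se : Nat × Nat) =>
      acc + runScore my ((se.2 : Int) - (se.1 : Int) + 1)
        ((if se.1 = 0 then (if (none : Option Int) = some (-1) then (1:Int) else 0)
          else (if row.getD (se.1 - 1) 0 = -1 then 1 else 0)) +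
         (if se.2 < row.length - 1 ∧ row.getD (se.2 + 1) 0 = -1 then 1 else 0))) := by
    funext acc se
    obtain ⟨s, e⟩ := se
    cases s with
    | zero => simp
    | succ j => simp
  rw [hbody]
  have hmain := foldG_main my color row.length row le_rfl none total (fun _ => by simp)
  simpa using hmain

lemma outer_eq (my : Bool) (color : Int) (rows : List (List Int)) :
    ∀ s : Int,
      rows.foldl (fun score row =>
        let st := row.foldl (stepA my color) (score, 0, 0)
        st.1 + (if 0 < st.2.2 then pyScoring my st.2.2 st.2.1 else 0)) s
      = rows.foldl (fun total row =>
          let n := row.length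
          let starts := (List.range n).filter
            (fun i => decide (row.getD i 0 = color ∧ (i = 0 ∨ row.getD (i - 1) 0 ≠ color)))
          let ends := (List.range n).filter
            (fun i => decide (row.getD i 0 = color ∧ (i = n - 1 ∨ row.getD (i + 1) 0 ≠ color)))
          (starts.zip ends).foldl (fun acc se =>
            acc + runScore my ((se.2 : Int) - (se.1 : Int) + 1)
              ((if 0 < se.1 ∧ row.getD (se.1 - 1) 0 = -1 then 1 else 0) +
               (if se.2 < n - 1 ∧ row.getD (se.2 + 1) 0 = -1 then 1 else 0))) total) s := by
  induction rows with
  | nil => intro s; rfl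
  | cons r rs ih =>
    intro s
    have h1 := innerA_eq_pvF my color r s 0 0 le_rfl
    have h2 := (pvF_eq_rowScoreB my color r).1 false
    norm_num at h2
    simp only [List.foldl_cons]
    rw [show (r.foldl (stepA my color) (s, 0, 0)).1 +
          (if 0 < (r.foldl (stepA my color) (s, 0, 0)).2.2 then
            pyScoring my (r.foldl (stepA my color) (s, 0, 0)).2.2
              (r.foldl (stepA my color) (s, 0, 0)).2.1 else 0)
        = s + rowScoreB my color false r from by
      rw [← h2, ← h1]; rfl, ← rowB_eq my color r s, ih]

-- ===== VERDICT (by name: the statement is the Claim_ definition above) =====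
theorem evaluate_diag_spec : Claim_equal_evaluate_diag := by
  intro my color rows _
  unfold Spec_evaluate_diag evaluate_diag evaluate_diag_alt
  exact outer_eq my color rows 0
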